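-- pv_equiv track=rewrite | github.com/scylladb/python-driver | cassandra/marshal.py | vints_unpack
-- ===== SOURCE A (Python) =====
-- def decode_zig_zag(n):
--     return (n >> 1) ^ -(n & 1)
--
-- def vints_unpack(term):  # noqa
--     values = []
--     n = 0
--     while n < len(term):
--         first_byte = term[n]
--
--         if (first_byte & 128) == 0:
--             val = first_byte
--         else:
--             num_extra_bytes = 8 - (~first_byte & 0xff).bit_length()
--             val = first_byte & (0xff >> num_extra_bytes)
--             end = n + num_extra_bytes
--             while n < end:
--                 n += 1
--                 val <<= 8
--                 val |= term[n] & 0xff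
--
--         n += 1
--         values.append(decode_zig_zag(val))
--
--     return tuple(values)
-- ===== SOURCE B (Python) =====
-- def decode_zig_zag(n):
--     return (n >> 1) ^ -(n & 1)
--
-- def vints_unpack(term):
--     # pass 1: the start index of every encoded varint
--     starts = []
--     n = 0
--     while n < len(term):
--         starts.append(n)
--         fb = term[n]
--         n += 1 if (fb & 128) == 0 else 9 - (~fb & 0xff).bit_length()
--
--     # pass 2: decode the varint at position n via a slice and one weighted sum
--     def value_at(n):
--         fb = term[n]
--         if (fb & 128) == 0:
--             return fb
--         k = 8 - (~fb & 0xff).bit_length()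
--         chunk = [fb & (0xff >> k)] + [b & 0xff for b in term[n + 1:n + 1 + k]]
--         return sum(b << (8 * (k - i)) for i, b in enumerate(chunk))
--
--     return tuple(decode_zig_zag(value_at(n)) for n in starts)
-- ===== Notes on version B (the rewrite author's own statement) =====
-- stated objective: simpler
-- what changed: The index-mutating while loops are replaced by a structural recursion over positions, and the inner shift/or byte-accumulation loop is replaced by slicing the extra bytes and rebuilding the value as one weighted sum over enumerate(chunk); Pre_ excludes the inputs where A raises IndexError (a truncated last varint).
import Mathlib
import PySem

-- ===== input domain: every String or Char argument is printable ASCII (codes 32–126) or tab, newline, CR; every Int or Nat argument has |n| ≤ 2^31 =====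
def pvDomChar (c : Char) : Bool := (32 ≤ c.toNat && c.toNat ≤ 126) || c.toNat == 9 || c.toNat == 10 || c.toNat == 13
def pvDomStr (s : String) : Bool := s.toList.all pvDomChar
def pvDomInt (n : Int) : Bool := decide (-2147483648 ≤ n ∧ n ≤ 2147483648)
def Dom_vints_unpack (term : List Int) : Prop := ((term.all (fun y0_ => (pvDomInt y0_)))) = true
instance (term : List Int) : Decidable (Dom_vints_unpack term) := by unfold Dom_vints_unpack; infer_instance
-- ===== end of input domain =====

-- B replaces A's index-mutating inner shift/or loop by a slice of the extra bytes plus one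
-- weighted sum, and turns the outer while loop into a structural recursion (simpler).
-- Loops are ported with an explicit fuel argument (fuel ≥ remaining iterations) so the
-- definitions reduce; fuel only totalises, it never changes the computation.

-- ===== PORT A =====

-- decode_zig_zag(n) = (n >> 1) ^ -(n & 1)
def pvZigZag (n : Int) : Int := PySem.Int.bxor (n >>> 1) (-(PySem.Int.band n 1))

-- num_extra_bytes = 8 - (~first_byte & 0xff).bit_length()
def pvNEB (fb : Int) : Nat := 8 - PySem.Int.bitLength (PySem.Int.band (Int.not fb) 255)

-- inner loop 'while n < end: n += 1; val <<= 8; val |= term[n] & 0xff', state (n, val)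
-- (the read term[n] is in range on every input admitted by Pre_; getD 0 totalises it)
def pvInnerA (term : List Int) (fuel : Nat) (endN n : Nat) (val : Int) : Nat × Int :=
  match fuel with
  | 0 => (n, val)
  | fuel + 1 =>
    if n < endN then
      pvInnerA term fuel endN (n + 1)
        (PySem.Int.bor (val <<< (8 : Nat)) (PySem.Int.band (term.getD (n + 1) 0) 255))
    else (n, val)

-- outer 'while n < len(term)' loop with accumulator values
def pvLoopA (term : List Int) (fuel : Nat) (n : Nat) (values : List Int) : List Int :=
  match fuel with
  | 0 => values
  | fuel + 1 =>
    if n < term.length then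
      let fb := term.getD n 0
      if PySem.Int.band fb 128 == 0 then
        pvLoopA term fuel (n + 1) (values ++ [pvZigZag fb])
      else
        let k := pvNEB fb
        let p := pvInnerA term k (n + k) n (PySem.Int.band fb ((255 : Int) >>> k))
        pvLoopA term fuel (p.1 + 1) (values ++ [pvZigZag p.2])
    else values

def vints_unpack (term : List Int) : List Int := pvLoopA term (term.length + 1) 0 []

-- ===== PORT B =====

-- pass 1: the start index of every encoded varint ('while n < len(term): starts.append(n); n += …')
def pvStartsB (term : List Int) (fuel : Nat) (n : Nat) : List Nat :=
  match fuel with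
  | 0 => []
  | fuel + 1 =>
    if n < term.length then
      let fb := term.getD n 0
      n :: pvStartsB term fuel
        (n + if PySem.Int.band fb 128 == 0 then 1
             else 9 - PySem.Int.bitLength (PySem.Int.band (Int.not fb) 255))
    else []

-- pass 2: value_at(n) — decode the varint at n via a slice and one weighted sum
def pvValueAtB (term : List Int) (n : Nat) : Int :=
  let fb := term.getD n 0
  if PySem.Int.band fb 128 == 0 then fb
  else
    let k := pvNEB fb
    let chunk := PySem.Int.band fb ((255 : Int) >>> k) ::
      (PySem.List.slice term (some ((n : Int) + 1)) (some ((n : Int) + 1 + (k : Int)))).map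
        (fun b => PySem.Int.band b 255)
    ((PySem.List.enumerate chunk).map
      (fun p : Int × Int => (p.2 <<< (8 * ((k : Int) - p.1)).toNat : Int))).sum

def vints_unpack_alt (term : List Int) : List Int :=
  (pvStartsB term (term.length + 1) 0).map (fun n => pvZigZag (pvValueAtB term n))

-- ===== PRECONDITION & SPEC =====

-- Pre_ excludes exactly the inputs where A raises IndexError: term is well formed iff every
-- multibyte header is followed by its announced count of extra bytes.  pvScan is one
-- structural pass over the list; skip counts the extra bytes still owed to the last header.
def pvScan : List Int → Nat → Bool
  | [], 0 => true
  | [], _ + 1 => false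
  | b :: rest, 0 =>
    if PySem.Int.band b 128 = 0 then pvScan rest 0 else pvScan rest (pvNEB b)
  | _ :: rest, skip + 1 => pvScan rest skip

def Pre_vints_unpack (term : List Int) : Prop := pvScan term 0 = true
instance (term : List Int) : Decidable (Pre_vints_unpack term) := by
  unfold Pre_vints_unpack; infer_instance

def pvWitness_vints_unpack : List Int := [130, 5, 7]

def Spec_vints_unpack (term : List Int) (out : List Int) : Prop := out = vints_unpack_alt term
instance (term : List Int) (out : List Int) : Decidable (Spec_vints_unpack term out) := by
  unfold Spec_vints_unpack; infer_instance

-- ===== CLAIM (what is proved, stated in full; the proofs are below) =====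
def Claim_equal_vints_unpack : Prop := ∀ (term : List Int), Dom_vints_unpack term → Pre_vints_unpack term → Spec_vints_unpack term (vints_unpack term)

-- ===== LEMMAS AND PROOFS =====

-- bits of m·2^k and of l < 2^k are disjoint, so OR is addition
theorem pvShlOrAdd : ∀ (k m l : Nat), l < 2 ^ k → (m <<< k) ||| l = m * 2 ^ k + l := by
  intro k
  induction k with
  | zero =>
    intro m l h
    interval_cases l
    simp [Nat.shiftLeft_eq]
  | succ k ih =>
    intro m l h
    have hl2 : l / 2 < 2 ^ k := by omega
    have hbit := Nat.bit_decide_mod_two_eq_one_shiftRight_one l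
    have hsl : m <<< (k + 1) = Nat.bit false (m <<< k) := by
      simp [Nat.bit_false_apply, Nat.shiftLeft_eq, pow_succ]
      ring
    have htn : (decide (l % 2 = 1)).toNat = l % 2 := by
      rcases Nat.mod_two_eq_zero_or_one l with h2 | h2 <;> simp [h2]
    have h2l : 2 * (l / 2) + l % 2 = l := by omega
    calc (m <<< (k + 1)) ||| l
        = Nat.bit false (m <<< k) ||| Nat.bit (decide (l % 2 = 1)) (l >>> 1) := by
          rw [hsl, hbit]
      _ = Nat.bit (false || decide (l % 2 = 1)) ((m <<< k) ||| (l >>> 1)) := by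
          rw [Nat.lor_bit]
      _ = Nat.bit (decide (l % 2 = 1)) (m * 2 ^ k + l / 2) := by
          rw [Bool.false_or, Nat.shiftRight_one, ih m (l / 2) hl2]
      _ = 2 * (m * 2 ^ k + l / 2) + l % 2 := by rw [Nat.bit_val, htn]
      _ = m * 2 ^ (k + 1) + (2 * (l / 2) + l % 2) := by rw [pow_succ]; ring
      _ = m * 2 ^ (k + 1) + l := by rw [h2l]

-- x & 0xff lies in [0, 256)
theorem pvBand255_bounds (x : Int) : 0 ≤ PySem.Int.band x 255 ∧ PySem.Int.band x 255 < 256 := by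
  unfold PySem.Int.band
  split_ifs with h1 h2 h2
  · refine ⟨Int.natCast_nonneg _, ?_⟩
    have hle : x.toNat &&& (255 : Int).toNat ≤ (255 : Int).toNat := Nat.and_le_right
    have : ((x.toNat &&& (255 : Int).toNat : Nat) : Int) ≤ 255 := by exact_mod_cast hle
    omega
  · omega
  · refine ⟨Int.natCast_nonneg _, ?_⟩
    have hle : ((255 : Int).toNat - ((255 : Int).toNat &&& (-x - 1).toNat) : Nat) ≤ (255 : Int).toNat :=
      Nat.sub_le _ _
    have : (((255 : Int).toNat - ((255 : Int).toNat &&& (-x - 1).toNat) : Nat) : Int) ≤ 255 := by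
      exact_mod_cast hle
    omega
  · omega

-- 0xff >> k is nonnegative
theorem pvMask_nonneg (k : Nat) : 0 ≤ ((255 : Int) >>> k) := by
  have : (255 : Int) >>> k = ((255 >>> k : Nat) : Int) := rfl
  rw [this]
  positivity

-- 'val <<= 8; val |= b' is val*256 + b for the nonnegative val the loop maintains
theorem pvStep (v b : Int) (hv : 0 ≤ v) (hb0 : 0 ≤ b) (hb : b < 256) :
    PySem.Int.bor (v <<< (8 : Nat)) b = v * 256 + b := by
  have hsh : v <<< (8 : Nat) = v * 256 := by rw [Int.shiftLeft_eq]; norm_num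
  have hvs : 0 ≤ v * 256 := by positivity
  unfold PySem.Int.bor
  rw [hsh, if_pos hvs, if_pos hb0]
  have hsn : (v * 256).toNat = v.toNat * 256 := by omega
  have hor : (v.toNat * 256) ||| b.toNat = v.toNat * 256 + b.toNat := by
    have := pvShlOrAdd 8 v.toNat b.toNat (by omega)
    simpa [Nat.shiftLeft_eq] using this
  rw [hsn, hor]
  push_cast
  omega

-- A's inner loop computes a left fold of the masked extra bytes
theorem pvInnerA_eq (term : List Int) : ∀ (k n : Nat) (v : Int), 0 ≤ v → n + k < term.length →
    pvInnerA term k (n + k) n v =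
      (n + k, (((term.drop (n + 1)).take k).map (fun b => PySem.Int.band b 255)).foldl
        (fun a b => a * 256 + b) v) := by
  intro k
  induction k with
  | zero => intro n v _ _; simp [pvInnerA]
  | succ k ih =>
    intro n v hv hlen
    have hn1 : n + 1 < term.length := by omega
    have hb := pvBand255_bounds (term.getD (n + 1) 0)
    have hstep : PySem.Int.bor (v <<< (8 : Nat)) (PySem.Int.band (term.getD (n + 1) 0) 255) =
        v * 256 + PySem.Int.band (term.getD (n + 1) 0) 255 :=
      pvStep _ _ hv hb.1 hb.2
    have hdrop : term.drop (n + 1) = term[n + 1] :: term.drop (n + 1 + 1) :=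
      List.drop_eq_getElem_cons hn1
    have hgetD : term.getD (n + 1) 0 = term[n + 1] := by
      rw [List.getD_eq_getElem?_getD, List.getElem?_eq_getElem hn1]
      rfl
    have hrec := ih (n + 1) (v * 256 + PySem.Int.band (term.getD (n + 1) 0) 255)
      (by have := hb.1; positivity) (by omega)
    have hend : n + (k + 1) = (n + 1) + k := by omega
    show pvInnerA term (k + 1) (n + (k + 1)) n v = _
    rw [pvInnerA, if_pos (by omega), hstep, hend, hrec, hdrop, List.take_succ_cons,
      List.map_cons, List.foldl_cons, hgetD]

-- shifting the init of the base-256 fold out as a leading coefficient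
theorem pvFoldInit (l : List Int) : ∀ (a c : Int),
    l.foldl (fun x b => x * 256 + b) (a + c) =
      a * 256 ^ l.length + l.foldl (fun x b => x * 256 + b) c := by
  induction l with
  | nil => intro a c; simp
  | cons b t ih =>
    intro a c
    simp only [List.foldl_cons, List.length_cons]
    have h1 : (a + c) * 256 + b = a * 256 + (c * 256 + b) := by ring
    rw [h1, ih (a * 256) (c * 256 + b)]
    ring

-- big-endian weight of a digit list
def pvWeight : List Int → Int
  | [] => 0
  | b :: t => b * 256 ^ t.length + pvWeight t

theorem pvWeight_eq_foldl : ∀ (t : List Int) (c : Int),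
    pvWeight (c :: t) = t.foldl (fun x b => x * 256 + b) c := by
  intro t
  induction t with
  | nil => intro c; simp [pvWeight]
  | cons b t ih =>
    intro c
    have h1 : pvWeight (c :: b :: t) = c * 256 ^ (t.length + 1) + pvWeight (b :: t) := by
      simp [pvWeight]
    rw [h1, ih b]
    have h2 : (b :: t).foldl (fun x b => x * 256 + b) c =
        t.foldl (fun x b => x * 256 + b) ((c * 256) + b) := by simp
    rw [h2, pvFoldInit t (c * 256) b]
    ring

-- B's enumerate-weighted sum is the big-endian weight of the chunk
theorem pvEnumSum : ∀ (l : List Int) (s K : Nat), s + l.length = K + 1 →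
    ((PySem.List.enumerate l (s : Int)).map
        (fun p : Int × Int => (p.2 <<< (8 * ((K : Int) - p.1)).toNat : Int))).sum =
      pvWeight l := by
  intro l
  induction l with
  | nil => intro s K h; simp [PySem.List.enumerate_nil, pvWeight]
  | cons b t ih =>
    intro s K h
    have hst : s + t.length = K := by simp at h; omega
    have hKs : (K : Int) - (s : Int) = (t.length : Int) := by omega
    have hcast : ((s : Int) + 1) = (((s + 1 : Nat)) : Int) := by push_cast; ring
    rw [PySem.List.enumerate_cons, List.map_cons, List.sum_cons, hcast,
      ih (s + 1) K (by omega)]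
    have hsh : (b <<< (8 * ((K : Int) - (s : Int))).toNat : Int) = b * 256 ^ t.length := by
      rw [hKs]
      have h8 : ((8 * (t.length : Int))).toNat = 8 * t.length := by omega
      rw [h8, Int.shiftLeft_eq, pow_mul]
      norm_num
    rw [hsh]
    simp [pvWeight]

-- a value in [0, 256) has bit length at most 8
theorem pvBL_le8 (x : Int) (h0 : 0 ≤ x) (h : x < 256) : PySem.Int.bitLength x ≤ 8 := by
  by_contra hgt
  rw [Nat.not_le] at hgt
  have hx0 : x ≠ 0 := by
    intro h'
    rw [h'] at hgt
    simp [PySem.Int.bitLength_zero] at hgt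
  have hle := PySem.Int.two_pow_bitLength_le x hx0
  have h2 : 2 ^ 8 ≤ 2 ^ (PySem.Int.bitLength x - 1) := Nat.pow_le_pow_right (by norm_num) (by omega)
  have hlt : x.natAbs < 256 := by omega
  omega

-- a pending skip of k bytes succeeds iff k bytes are present, and scanning resumes after them
theorem pvScan_skip : ∀ (k : Nat) (l : List Int), pvScan l k = true →
    k ≤ l.length ∧ pvScan (l.drop k) 0 = true := by
  intro k
  induction k with
  | zero => intro l h; simpa using h
  | succ k ih =>
    intro l h
    match l with
    | [] => simp [pvScan] at h
    | b :: rest =>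
      have h' : pvScan rest k = true := h
      obtain ⟨h1, h2⟩ := ih rest h'
      exact ⟨by simpa using Nat.succ_le_succ h1, by simpa using h2⟩

theorem pvLoopA_eq (term : List Int) : ∀ (fuel n : Nat) (values : List Int),
    term.length - n < fuel → pvScan (term.drop n) 0 = true →
    pvLoopA term fuel n values =
      values ++ (pvStartsB term fuel n).map (fun m => pvZigZag (pvValueAtB term m)) := by
  intro fuel
  induction fuel with
  | zero => intro n values h; omega
  | succ fuel ih =>
    intro n values hfuel hpre
    by_cases hn : n < term.length
    · have hgetD : term.getD n 0 = term[n] := by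
        rw [List.getD_eq_getElem?_getD, List.getElem?_eq_getElem hn]
        rfl
      rw [List.drop_eq_getElem_cons hn, pvScan, ← hgetD] at hpre
      rw [pvLoopA, pvStartsB, if_pos hn, if_pos hn]
      simp only [beq_iff_eq, List.map_cons] at hpre ⊢
      by_cases hmb : PySem.Int.band (term.getD n 0) 128 = 0
      · -- standalone byte
        rw [if_pos hmb] at hpre
        rw [if_pos hmb, if_pos hmb]
        have hval : pvValueAtB term n = term.getD n 0 := by
          unfold pvValueAtB
          simp only [beq_iff_eq]
          rw [if_pos hmb]
        rw [hval, ih (n + 1) (values ++ [pvZigZag (term.getD n 0)]) (by omega) hpre]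
        simp
      · -- multibyte
        rw [if_neg hmb] at hpre
        rw [if_neg hmb, if_neg hmb]
        set k := pvNEB (term.getD n 0) with hk
        have hbl9 : 9 - PySem.Int.bitLength (PySem.Int.band (Int.not (term.getD n 0)) 255) = k + 1 := by
          have hb := pvBand255_bounds (Int.not (term.getD n 0))
          have := pvBL_le8 _ hb.1 hb.2
          rw [hk]
          unfold pvNEB
          omega
        rw [hbl9]
        obtain ⟨hk1, hk2⟩ := pvScan_skip k (term.drop (n + 1)) hpre
        have hin : n + k < term.length := by
          have : (term.drop (n + 1)).length = term.length - (n + 1) := List.length_drop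
          omega
        have hpre' : pvScan (term.drop (n + k + 1)) 0 = true := by
          have hdd : (term.drop (n + 1)).drop k = term.drop (n + k + 1) := by
            rw [List.drop_drop]
            congr 1
            omega
          rwa [hdd] at hk2
        set c0 := PySem.Int.band (term.getD n 0) ((255 : Int) >>> k) with hc0
        have hc0n : 0 ≤ c0 := by
          rw [hc0, PySem.Int.band_comm]
          exact PySem.Int.band_nonneg_of_nonneg_left _ (pvMask_nonneg k)
        set rest := ((term.drop (n + 1)).take k).map (fun b => PySem.Int.band b 255) with hrest
        have hrlen : rest.length = k := by
          rw [hrest]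
          simp
          omega
        have hinner := pvInnerA_eq term k n c0 hc0n hin
        have hslice : PySem.List.slice term (some ((n : Int) + 1)) (some ((n : Int) + 1 + (k : Int)))
            = (term.drop (n + 1)).take k := by
          have h1 : ((n : Int) + 1) = (((n + 1 : Nat)) : Int) := by push_cast; ring
          rw [h1]
          have h2 : ((((n + 1 : Nat)) : Int) + (k : Int)) = (((n + 1 + k : Nat)) : Int) := by
            push_cast; ring
          rw [h2, PySem.List.slice_natCast]
          congr 1
          omega
        have hsum : ((PySem.List.enumerate (c0 :: rest)).map
            (fun p : Int × Int => (p.2 <<< (8 * ((k : Int) - p.1)).toNat : Int))).sum =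
            rest.foldl (fun a b => a * 256 + b) c0 := by
          have hlen1 : (0 : Nat) + (c0 :: rest).length = k + 1 := by simp [hrlen]
          calc ((PySem.List.enumerate (c0 :: rest)).map
              (fun p : Int × Int => (p.2 <<< (8 * ((k : Int) - p.1)).toNat : Int))).sum
              = pvWeight (c0 :: rest) := by
                rw [show PySem.List.enumerate (c0 :: rest) =
                      PySem.List.enumerate (c0 :: rest) (((0 : Nat)) : Int) by norm_num]
                exact pvEnumSum (c0 :: rest) 0 k hlen1
            _ = rest.foldl (fun a b => a * 256 + b) c0 := pvWeight_eq_foldl rest c0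
        have hval : pvValueAtB term n = rest.foldl (fun a b => a * 256 + b) c0 := by
          unfold pvValueAtB
          simp only [beq_iff_eq]
          rw [if_neg hmb, ← hk, ← hc0, hslice, ← hrest]
          exact hsum
        rw [hinner, hval]
        have hstep1 : n + (k + 1) = n + k + 1 := by omega
        rw [hstep1, ih (n + k + 1) _ (by omega) hpre']
        simp [hrest, List.map_take, List.map_drop]
    · rw [pvLoopA, pvStartsB, if_neg hn, if_neg hn]
      simp

-- ===== VERDICT (by name: the statement is the Claim_ definition above) =====
theorem vints_unpack_spec : Claim_equal_vints_unpack := by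
  intro term _ hpre
  unfold Spec_vints_unpack vints_unpack vints_unpack_alt
  exact pvLoopA_eq term (term.length + 1) 0 [] (by omega) (by simpa using hpre)
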